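-- pv_equiv track=rewrite | github.com/rezendegabriel/dcc136_aloc_corr | problema_alocacao_corredor.py | recalcula_arranjo
-- ===== SOURCE A (Python) =====
-- def recalcula_arranjo(solucao_it, num_fac,
--                       num_fac_arranjo_sup, num_fac_arranjo_inf,
--                       comps, centros, matriz_trafs):
--
--     custo_total_it = 0 #custo total
--
--     pos = [0]*num_fac #posições das facilidades
--
--     #comprimentos de cada arranjo do corredor
--     comp_arranjo_sup = 0
--     comp_arranjo_inf = 0
--
--     #atualizações no arranjo superior
--     for i in range(num_fac_arranjo_sup):
--         fac_i = solucao_it[i]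
--
--         pos[fac_i] = comp_arranjo_sup+centros[fac_i] #atualização da posição
--
--         comp_arranjo_sup += comps[fac_i] #atualização do comprimento
--
--     #atualizações no arranjo inferior
--     for i in range(num_fac_arranjo_inf):
--         fac_i = solucao_it[(num_fac-1)-i]
--
--         pos[fac_i] = comp_arranjo_inf+centros[fac_i] #atualização da posição
--
--         comp_arranjo_inf += comps[fac_i] #atualização do comprimento
--
--     #recalcula custo do arranjo superior com arranjo superior
--     for i in range(num_fac_arranjo_sup):
--         fac_i = solucao_it[i]
--
--         n = i+1
--         while n < num_fac_arranjo_sup: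
--             fac_n = solucao_it[n]
--
--             custo_total_it += abs(pos[fac_i]-pos[fac_n])*matriz_trafs[fac_i][fac_n]
--
--             n+=1
--
--         #recalcula custo do arranjo superior com arranjo inferior
--         for j in range(num_fac_arranjo_inf):
--             fac_j = solucao_it[(num_fac-1)-j]
--
--             custo_total_it += abs(pos[fac_i]-pos[fac_j])*matriz_trafs[fac_i][fac_j]
--
--     #recalcula custo do arranjo inferior com arranjo inferior
--     for j in range(num_fac_arranjo_inf):
--         fac_j = solucao_it[(num_fac-1)-j]
--
--         n = j+1
--         while n < num_fac_arranjo_inf: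
--             fac_n = solucao_it[(num_fac-1)-n]
--
--             custo_total_it += abs(pos[fac_j]-pos[fac_n])*matriz_trafs[fac_j][fac_n]
--
--             n+=1
--
--     return custo_total_it
-- ===== SOURCE B (Python) =====
-- def recalcula_arranjo(solucao_it, num_fac,
--                       num_fac_arranjo_sup, num_fac_arranjo_inf,
--                       comps, centros, matriz_trafs):
--     # the facility sequences of the two corridor rows, extracted once
--     sup_row = [solucao_it[i] for i in range(num_fac_arranjo_sup)]
--     inf_row = [solucao_it[(num_fac-1)-j] for j in range(num_fac_arranjo_inf)]
--
--     # positions: one loop over the two rows instead of two copied index loops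
--     pos = [0]*num_fac
--     for row in (sup_row, inf_row):
--         comp = 0
--         for f in row:
--             pos[f] = comp + centros[f]
--             comp += comps[f]
--
--     # one uniform peel-head pass over the combined ordering replaces the
--     # three specialised pair loops (sup-sup, sup-inf, inf-inf)
--     total = 0
--     rest = sup_row + inf_row
--     while rest:
--         f, rest = rest[0], rest[1:]
--         for g in rest:
--             total += abs(pos[f]-pos[g])*matriz_trafs[f][g]
--     return total
-- ===== Notes on version B (the rewrite author's own statement) =====
-- stated objective: simpler
-- what changed: B extracts the two corridor rows as explicit facility lists, builds positions with one loop over the two rows instead of two copied index loops, and replaces A's three specialised pair loops (sup-sup while-loop, sup-inf, inf-inf) by a single peel-head pass over the concatenated ordering.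
import Mathlib
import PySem

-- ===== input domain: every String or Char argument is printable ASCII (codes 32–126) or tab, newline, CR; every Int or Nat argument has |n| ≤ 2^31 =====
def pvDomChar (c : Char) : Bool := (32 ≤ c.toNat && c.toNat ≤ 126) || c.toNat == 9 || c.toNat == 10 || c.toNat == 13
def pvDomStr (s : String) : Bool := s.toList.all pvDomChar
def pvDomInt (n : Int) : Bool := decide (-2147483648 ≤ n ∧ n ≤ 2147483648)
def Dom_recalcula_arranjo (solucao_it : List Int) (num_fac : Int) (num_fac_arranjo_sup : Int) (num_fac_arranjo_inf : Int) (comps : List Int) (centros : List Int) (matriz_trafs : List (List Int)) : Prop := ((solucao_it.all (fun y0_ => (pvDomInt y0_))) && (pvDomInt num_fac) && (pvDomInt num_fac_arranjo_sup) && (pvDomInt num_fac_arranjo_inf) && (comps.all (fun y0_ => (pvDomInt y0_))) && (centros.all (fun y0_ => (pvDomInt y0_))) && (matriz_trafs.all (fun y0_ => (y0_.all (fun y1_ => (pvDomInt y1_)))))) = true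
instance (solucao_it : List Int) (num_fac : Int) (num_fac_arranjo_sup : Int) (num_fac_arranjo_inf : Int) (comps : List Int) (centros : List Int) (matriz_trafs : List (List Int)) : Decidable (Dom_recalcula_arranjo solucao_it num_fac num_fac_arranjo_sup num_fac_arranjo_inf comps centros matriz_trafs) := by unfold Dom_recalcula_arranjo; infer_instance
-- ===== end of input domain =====

-- B replaces A's two copied position loops and three specialised pair loops by one loop
-- over the two extracted rows and one uniform peel-head pair pass (objective: simpler).

-- ===== PORT A =====
def recalcula_arranjo (solucao_it : List Int) (num_fac : Int) (num_fac_arranjo_sup : Int) (num_fac_arranjo_inf : Int) (comps : List Int) (centros : List Int) (matriz_trafs : List (List Int)) : Int :=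
  -- pos = [0]*num_fac
  let pos0 : List Int := List.replicate num_fac.toNat 0
  -- for i in range(num_fac_arranjo_sup): pos[fac_i] = comp_sup + centros[fac_i]; comp_sup += comps[fac_i]
  let st1 : List Int × Int :=
    (PySem.List.pyRange 0 num_fac_arranjo_sup 1).foldl (fun st i =>
      let fac_i := PySem.List.pyGetD solucao_it i 0
      (PySem.List.pySetD st.1 fac_i (st.2 + PySem.List.pyGetD centros fac_i 0),
       st.2 + PySem.List.pyGetD comps fac_i 0)) (pos0, 0)
  -- for i in range(num_fac_arranjo_inf): pos[fac_i] = comp_inf + centros[fac_i]; comp_inf += comps[fac_i]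
  let st2 : List Int × Int :=
    (PySem.List.pyRange 0 num_fac_arranjo_inf 1).foldl (fun st j =>
      let fac_i := PySem.List.pyGetD solucao_it (num_fac - 1 - j) 0
      (PySem.List.pySetD st.1 fac_i (st.2 + PySem.List.pyGetD centros fac_i 0),
       st.2 + PySem.List.pyGetD comps fac_i 0)) (st1.1, 0)
  let pos := st2.1
  -- sup-sup (while n < num_fac_arranjo_sup) and sup-inf loops
  let c1 : Int :=
    (PySem.List.pyRange 0 num_fac_arranjo_sup 1).foldl (fun acc i =>
      let fac_i := PySem.List.pyGetD solucao_it i 0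
      let acc := (PySem.List.pyRange (i + 1) num_fac_arranjo_sup 1).foldl (fun acc n =>
        let fac_n := PySem.List.pyGetD solucao_it n 0
        acc + |PySem.List.pyGetD pos fac_i 0 - PySem.List.pyGetD pos fac_n 0| *
          PySem.List.pyGetD (PySem.List.pyGetD matriz_trafs fac_i []) fac_n 0) acc
      (PySem.List.pyRange 0 num_fac_arranjo_inf 1).foldl (fun acc j =>
        let fac_j := PySem.List.pyGetD solucao_it (num_fac - 1 - j) 0
        acc + |PySem.List.pyGetD pos fac_i 0 - PySem.List.pyGetD pos fac_j 0| *
          PySem.List.pyGetD (PySem.List.pyGetD matriz_trafs fac_i []) fac_j 0) acc) 0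
  -- inf-inf loop
  (PySem.List.pyRange 0 num_fac_arranjo_inf 1).foldl (fun acc j =>
    let fac_j := PySem.List.pyGetD solucao_it (num_fac - 1 - j) 0
    (PySem.List.pyRange (j + 1) num_fac_arranjo_inf 1).foldl (fun acc n =>
      let fac_n := PySem.List.pyGetD solucao_it (num_fac - 1 - n) 0
      acc + |PySem.List.pyGetD pos fac_j 0 - PySem.List.pyGetD pos fac_n 0| *
        PySem.List.pyGetD (PySem.List.pyGetD matriz_trafs fac_j []) fac_n 0) acc) c1

-- ===== PORT B =====
-- while rest: f, rest = rest[0], rest[1:]; for g in rest: total += abs(pos[f]-pos[g])*matriz_trafs[f][g]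
def pvPairPass (pos : List Int) (matriz_trafs : List (List Int)) (total : Int) : List Int → Int
  | [] => total
  | f :: rest =>
    pvPairPass pos matriz_trafs
      (rest.foldl (fun total g =>
        total + |PySem.List.pyGetD pos f 0 - PySem.List.pyGetD pos g 0| *
          PySem.List.pyGetD (PySem.List.pyGetD matriz_trafs f []) g 0) total) rest

def recalcula_arranjo_alt (solucao_it : List Int) (num_fac : Int) (num_fac_arranjo_sup : Int) (num_fac_arranjo_inf : Int) (comps : List Int) (centros : List Int) (matriz_trafs : List (List Int)) : Int :=
  let sup_row := (PySem.List.pyRange 0 num_fac_arranjo_sup 1).map (fun i => PySem.List.pyGetD solucao_it i 0)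
  let inf_row := (PySem.List.pyRange 0 num_fac_arranjo_inf 1).map (fun j => PySem.List.pyGetD solucao_it (num_fac - 1 - j) 0)
  -- for row in (sup_row, inf_row): comp = 0; for f in row: pos[f] = comp + centros[f]; comp += comps[f]
  let pos := [sup_row, inf_row].foldl (fun pos row =>
    (row.foldl (fun (st : List Int × Int) f =>
      (PySem.List.pySetD st.1 f (st.2 + PySem.List.pyGetD centros f 0),
       st.2 + PySem.List.pyGetD comps f 0)) (pos, 0)).1) (List.replicate num_fac.toNat 0)
  pvPairPass pos matriz_trafs 0 (sup_row ++ inf_row)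

-- ===== PRECONDITION & SPEC =====
-- Pre_ is exactly the condition that every list access A performs is a valid Python
-- index (no IndexError): the two row index ranges stay inside solucao_it (stated as
-- arithmetic bounds on the range endpoints), every touched facility is a valid index
-- into pos/centros/comps, and for every ordered pair of positions the traffic-matrix
-- row and cell exist.
def Pre_recalcula_arranjo (solucao_it : List Int) (num_fac : Int) (num_fac_arranjo_sup : Int) (num_fac_arranjo_inf : Int) (comps : List Int) (centros : List Int) (matriz_trafs : List (List Int)) : Prop :=
  let S := (PySem.List.pyRange 0 num_fac_arranjo_sup 1).map (fun i => PySem.List.pyGetD solucao_it i 0)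
  let I := (PySem.List.pyRange 0 num_fac_arranjo_inf 1).map (fun j => PySem.List.pyGetD solucao_it (num_fac - 1 - j) 0)
  let SI := S ++ I
  (num_fac_arranjo_sup ≤ (solucao_it.length : Int)) ∧
  (num_fac_arranjo_inf ≤ 0 ∨
    (num_fac - 1 < (solucao_it.length : Int) ∧
     -(solucao_it.length : Int) ≤ num_fac - num_fac_arranjo_inf)) ∧
  (∀ f ∈ SI, PySem.Raise.InRange num_fac.toNat f ∧ PySem.Raise.InRange centros.length f ∧
    PySem.Raise.InRange comps.length f) ∧
  (∀ b ∈ List.range SI.length, ∀ a ∈ List.range b,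
    PySem.Raise.InRange matriz_trafs.length (SI.getD a 0) ∧
    PySem.Raise.InRange (PySem.List.pyGetD matriz_trafs (SI.getD a 0) []).length (SI.getD b 0))
instance (solucao_it : List Int) (num_fac : Int) (num_fac_arranjo_sup : Int) (num_fac_arranjo_inf : Int) (comps : List Int) (centros : List Int) (matriz_trafs : List (List Int)) : Decidable (Pre_recalcula_arranjo solucao_it num_fac num_fac_arranjo_sup num_fac_arranjo_inf comps centros matriz_trafs) := by unfold Pre_recalcula_arranjo; infer_instance

def pvWitness_recalcula_arranjo : List Int × Int × Int × Int × List Int × List Int × List (List Int) :=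
  ([0, 2, 1], 3, 2, 1, [2, 3, 4], [1, 1, 2], [[0, 5, 1], [5, 0, 2], [1, 2, 0]])

def Spec_recalcula_arranjo (solucao_it : List Int) (num_fac : Int) (num_fac_arranjo_sup : Int) (num_fac_arranjo_inf : Int) (comps : List Int) (centros : List Int) (matriz_trafs : List (List Int)) (out : Int) : Prop := out = recalcula_arranjo_alt solucao_it num_fac num_fac_arranjo_sup num_fac_arranjo_inf comps centros matriz_trafs
instance (solucao_it : List Int) (num_fac : Int) (num_fac_arranjo_sup : Int) (num_fac_arranjo_inf : Int) (comps : List Int) (centros : List Int) (matriz_trafs : List (List Int)) (out : Int) : Decidable (Spec_recalcula_arranjo solucao_it num_fac num_fac_arranjo_sup num_fac_arranjo_inf comps centros matriz_trafs out) := by unfold Spec_recalcula_arranjo; infer_instance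

-- ===== CLAIM (what is proved, stated in full; the proofs are below) =====
def Claim_equal_recalcula_arranjo : Prop := ∀ (solucao_it : List Int) (num_fac : Int) (num_fac_arranjo_sup : Int) (num_fac_arranjo_inf : Int) (comps : List Int) (centros : List Int) (matriz_trafs : List (List Int)), Dom_recalcula_arranjo solucao_it num_fac num_fac_arranjo_sup num_fac_arranjo_inf comps centros matriz_trafs → Pre_recalcula_arranjo solucao_it num_fac num_fac_arranjo_sup num_fac_arranjo_inf comps centros matriz_trafs → Spec_recalcula_arranjo solucao_it num_fac num_fac_arranjo_sup num_fac_arranjo_inf comps centros matriz_trafs (recalcula_arranjo solucao_it num_fac num_fac_arranjo_sup num_fac_arranjo_inf comps centros matriz_trafs)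

-- ===== LEMMAS AND PROOFS =====

-- the weighted cost of one ordered pair of facilities
def pvW (pos : List Int) (mt : List (List Int)) (f g : Int) : Int :=
  |PySem.List.pyGetD pos f 0 - PySem.List.pyGetD pos g 0| *
    PySem.List.pyGetD (PySem.List.pyGetD mt f []) g 0

theorem pvW_def (pos : List Int) (mt : List (List Int)) (f g : Int) :
    pvW pos mt f g =
      |PySem.List.pyGetD pos f 0 - PySem.List.pyGetD pos g 0| *
        PySem.List.pyGetD (PySem.List.pyGetD mt f []) g 0 := rfl

-- total pairwise cost of an ordering (sum over all unordered pairs, head first)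
def pvP (pos : List Int) (mt : List (List Int)) : List Int → Int
  | [] => 0
  | f :: r => (r.map (pvW pos mt f)).sum + pvP pos mt r

-- cross cost between two blocks
def pvCross (pos : List Int) (mt : List (List Int)) (xs ys : List Int) : Int :=
  (xs.map (fun x => (ys.map (pvW pos mt x)).sum)).sum

theorem pvPairPass_eq (pos : List Int) (mt : List (List Int)) (l : List Int) :
    ∀ t : Int, pvPairPass pos mt t l = t + pvP pos mt l := by
  induction l with
  | nil => intro t; simp [pvPairPass, pvP]
  | cons f r ih =>
      intro t
      simp only [pvPairPass, pvP, ih, PySem.List.foldl_add, ← pvW_def]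
      ring

theorem pvP_append (pos : List Int) (mt : List (List Int)) (ys : List Int) :
    ∀ xs : List Int, pvP pos mt (xs ++ ys) = pvP pos mt xs + pvCross pos mt xs ys + pvP pos mt ys := by
  intro xs
  induction xs with
  | nil => simp [pvP, pvCross]
  | cons x r ih =>
      simp only [List.cons_append, pvP, pvCross, List.map_cons, List.sum_cons, List.map_append,
        List.sum_append, ih]
      ring

-- A's triangular index loop (outer index i, inner indices i+1..b-1) is pvP of the value list
theorem pvTri (pos : List Int) (mt : List (List Int)) (get : Int → Int) (b : Int) :
    ∀ (k : Nat) (a : Int), (b - a).toNat = k → ∀ acc : Int,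
      (PySem.List.pyRange a b 1).foldl (fun acc i =>
        (PySem.List.pyRange (i + 1) b 1).foldl
          (fun acc n => acc + pvW pos mt (get i) (get n)) acc) acc
      = acc + pvP pos mt ((PySem.List.pyRange a b 1).map get) := by
  intro k
  induction k with
  | zero =>
      intro a h acc
      rw [PySem.List.pyRange_one_eq_nil (by omega)]
      simp [pvP]
  | succ k ih =>
      intro a h acc
      rw [PySem.List.pyRange_one_cons (by omega)]
      simp only [List.foldl_cons, List.map_cons]
      rw [PySem.List.foldl_add, ih (a + 1) (by omega)]
      simp only [pvP, List.map_map, Function.comp_def]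
      ring

theorem pvTri' (pos : List Int) (mt : List (List Int)) (get : Int → Int) (b a acc : Int) :
    (PySem.List.pyRange a b 1).foldl (fun acc i =>
      (PySem.List.pyRange (i + 1) b 1).foldl
        (fun acc n => acc + pvW pos mt (get i) (get n)) acc) acc
    = acc + pvP pos mt ((PySem.List.pyRange a b 1).map get) :=
  pvTri pos mt get b _ a rfl acc

-- A's upper loop: triangular part plus, per outer index, a full pass over the lower row
theorem pvSupShape (pos : List Int) (mt : List (List Int)) (get get2 : Int → Int)
    (b lo2 hi2 : Int) :
    ∀ (k : Nat) (a : Int), (b - a).toNat = k → ∀ acc : Int,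
      (PySem.List.pyRange a b 1).foldl (fun acc i =>
        (PySem.List.pyRange lo2 hi2 1).foldl
          (fun acc j => acc + pvW pos mt (get i) (get2 j))
          ((PySem.List.pyRange (i + 1) b 1).foldl
            (fun acc n => acc + pvW pos mt (get i) (get n)) acc)) acc
      = acc + pvP pos mt ((PySem.List.pyRange a b 1).map get)
          + pvCross pos mt ((PySem.List.pyRange a b 1).map get)
              ((PySem.List.pyRange lo2 hi2 1).map get2) := by
  intro k
  induction k with
  | zero =>
      intro a h acc
      rw [show PySem.List.pyRange a b 1 = [] from PySem.List.pyRange_one_eq_nil (by omega)]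
      simp [pvP, pvCross]
  | succ k ih =>
      intro a h acc
      rw [show PySem.List.pyRange a b 1 = a :: PySem.List.pyRange (a + 1) b 1 from
        PySem.List.pyRange_one_cons (by omega)]
      simp only [List.foldl_cons, List.map_cons]
      rw [PySem.List.foldl_add, PySem.List.foldl_add, ih (a + 1) (by omega)]
      simp only [pvP, pvCross, List.map_cons, List.sum_cons, List.map_map, Function.comp_def]
      ring

-- the two ports agree on every input (defaults included)
theorem pv_ports_eq (solucao_it : List Int) (num_fac : Int) (num_fac_arranjo_sup : Int)
    (num_fac_arranjo_inf : Int) (comps : List Int) (centros : List Int)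
    (matriz_trafs : List (List Int)) :
    recalcula_arranjo solucao_it num_fac num_fac_arranjo_sup num_fac_arranjo_inf comps centros matriz_trafs
    = recalcula_arranjo_alt solucao_it num_fac num_fac_arranjo_sup num_fac_arranjo_inf comps centros matriz_trafs := by
  unfold recalcula_arranjo recalcula_arranjo_alt
  dsimp only
  simp only [List.foldl_cons, List.foldl_nil, List.foldl_map]
  simp only [← pvW_def]
  rw [pvPairPass_eq, pvP_append]
  rw [pvTri', pvSupShape _ _ _ _ _ _ _ _ 0 rfl]
  ring

-- ===== VERDICT (by name: the statement is the Claim_ definition above) =====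
theorem recalcula_arranjo_spec : Claim_equal_recalcula_arranjo := by
  intro solucao_it num_fac sup inf comps centros mt _ _
  unfold Spec_recalcula_arranjo
  exact pv_ports_eq solucao_it num_fac sup inf comps centros mt
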